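-- pv_equiv track=rewrite | github.com/cryptable/adventcode2020 | day15/part1/main.py | newNumberToSpeak
-- ===== SOURCE A (Python) =====
-- def newNumberToSpeak(value, list):
--     first = -1
--     second = -1
--     for idx in range(len(list)-1, -1, -1):
--         if list[idx] == value:
--             if first == -1:
--                 first = idx
--             elif second == -1:
--                 return first-idx
--     return 0
-- ===== SOURCE B (Python) =====
-- def newNumberToSpeak(value, list):
--     idxs = [i for i, x in enumerate(list) if x == value]
--     if len(idxs) >= 2:
--         return idxs[-1] - idxs[-2]
--     return 0
-- ===== Notes on version B (the rewrite author's own statement) =====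
-- stated objective: idiomatic
-- what changed: Replaces A's backward early-exit index scan with a single forward enumerate pass that materialises the list of matching indices and returns the difference of its last two entries.
import Mathlib
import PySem

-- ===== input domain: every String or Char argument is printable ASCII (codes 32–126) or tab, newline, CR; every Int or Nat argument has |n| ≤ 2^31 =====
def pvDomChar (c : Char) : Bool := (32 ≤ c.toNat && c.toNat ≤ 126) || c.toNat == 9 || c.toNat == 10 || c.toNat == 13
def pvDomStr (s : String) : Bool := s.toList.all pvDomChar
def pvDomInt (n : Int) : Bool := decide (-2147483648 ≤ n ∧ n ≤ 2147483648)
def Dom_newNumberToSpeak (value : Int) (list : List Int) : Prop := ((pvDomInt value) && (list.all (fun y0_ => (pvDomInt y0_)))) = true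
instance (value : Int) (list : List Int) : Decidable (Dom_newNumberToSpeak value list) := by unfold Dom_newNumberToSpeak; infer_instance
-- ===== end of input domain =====

-- B replaces A's backward early-exit scan with one forward enumerate pass collecting all matching
-- indices and taking the difference of the last two (objective: idiomatic; same O(n) cost).

-- ===== PORT A =====
-- the 'for idx in range(len(list)-1, -1, -1)' loop, state (first, second); early return = base value
def newNumberToSpeakLoop (value : Int) (list : List Int) :
    List Int → Int → Int → Int
  | [], _, _ => 0
  | idx :: rest, first, second =>
    if PySem.List.pyGet? list idx = some value then
      if first = -1 then newNumberToSpeakLoop value list rest idx second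
      else if second = -1 then first - idx
      else newNumberToSpeakLoop value list rest first second
    else newNumberToSpeakLoop value list rest first second

def newNumberToSpeak (value : Int) (list : List Int) : Int :=
  newNumberToSpeakLoop value list
    (PySem.List.pyRange ((list.length : Int) - 1) (-1) (-1)) (-1) (-1)

-- ===== PORT B =====
def newNumberToSpeak_alt (value : Int) (list : List Int) : Int :=
  let idxs := ((PySem.List.enumerate list 0).filter (fun p => p.2 == value)).map (fun p => p.1)
  if 2 ≤ idxs.length then
    PySem.List.pyGetD idxs (-1) 0 - PySem.List.pyGetD idxs (-2) 0
  else 0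

-- ===== PRECONDITION & SPEC =====
def Spec_newNumberToSpeak (value : Int) (list : List Int) (out : Int) : Prop := out = newNumberToSpeak_alt value list
instance (value : Int) (list : List Int) (out : Int) : Decidable (Spec_newNumberToSpeak value list out) := by unfold Spec_newNumberToSpeak; infer_instance

-- ===== CLAIM (what is proved, stated in full; the proofs are below) =====
def Claim_equal_newNumberToSpeak : Prop := ∀ (value : Int) (list : List Int), Dom_newNumberToSpeak value list → Spec_newNumberToSpeak value list (newNumberToSpeak value list)

-- ===== LEMMAS AND PROOFS =====

-- every pair of 'enumerate xs s' is (s+k, xs[k]) : its index is ≥ s and looks its value up in xs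
lemma mem_enumerate_spec (xs : List Int) (s : Int) (p : Int × Int)
    (hp : p ∈ PySem.List.enumerate xs s) :
    s ≤ p.1 ∧ PySem.List.pyGet? xs (p.1 - s) = some p.2 := by
  induction xs generalizing s with
  | nil => simp [PySem.List.enumerate_nil] at hp
  | cons x xs ih =>
    rw [PySem.List.enumerate_cons, List.mem_cons] at hp
    rcases hp with hp | hp
    · subst hp
      simp [PySem.List.pyGet?_zero_cons]
    · obtain ⟨h1, h2⟩ := ih (s + 1) hp
      refine ⟨by omega, ?_⟩
      have : p.1 - s = (p.1 - (s + 1)) + 1 := by omega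
      rw [this]
      have hnn : 0 ≤ p.1 - (s + 1) := by omega
      obtain ⟨n, hn⟩ := Int.eq_ofNat_of_zero_le hnn
      rw [hn] at h2 ⊢
      rw [PySem.List.pyGet?_cons_succ]
      exact h2

-- A's loop, once 'first' is set (to some index ≥ 0): returns first - (next match) or 0
lemma loop_found (value : Int) (list : List Int) :
    ∀ (R : List (Int × Int)) (f : Int), 0 ≤ f →
    (∀ p ∈ R, PySem.List.pyGet? list p.1 = some p.2) →
    newNumberToSpeakLoop value list (R.map (fun p => p.1)) f (-1) =
      match (R.filter (fun p => p.2 == value)).map (fun p => p.1) with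
      | b :: _ => f - b
      | [] => 0 := by
  intro R
  induction R with
  | nil => intro f _ _; simp [newNumberToSpeakLoop]
  | cons q R ih =>
    intro f hf hall
    have hq := hall q (by simp)
    by_cases hv : q.2 = value
    · rw [List.map_cons,
        show newNumberToSpeakLoop value list (q.1 :: R.map (fun p => p.1)) f (-1) = f - q.1 from by
          simp [newNumberToSpeakLoop, hq, hv, show f ≠ -1 by omega],
        List.filter_cons, if_pos (by simpa using hv), List.map_cons]
    · rw [List.map_cons,
        show newNumberToSpeakLoop value list (q.1 :: R.map (fun p => p.1)) f (-1)
            = newNumberToSpeakLoop value list (R.map (fun p => p.1)) f (-1) from by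
          simp [newNumberToSpeakLoop, hq, hv],
        List.filter_cons, if_neg (by simpa using hv)]
      exact ih f hf (fun p hp => hall p (by simp [hp]))

-- A's loop from the initial state: difference of the first two matches it meets
lemma loop_start (value : Int) (list : List Int) :
    ∀ (R : List (Int × Int)),
    (∀ p ∈ R, 0 ≤ p.1 ∧ PySem.List.pyGet? list p.1 = some p.2) →
    newNumberToSpeakLoop value list (R.map (fun p => p.1)) (-1) (-1) =
      match (R.filter (fun p => p.2 == value)).map (fun p => p.1) with
      | a :: b :: _ => a - b
      | _ => 0 := by
  intro R
  induction R with
  | nil => intro _; simp [newNumberToSpeakLoop]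
  | cons q R ih =>
    intro hall
    obtain ⟨hq0, hq⟩ := hall q (by simp)
    have hrest : ∀ p ∈ R, 0 ≤ p.1 ∧ PySem.List.pyGet? list p.1 = some p.2 :=
      fun p hp => hall p (by simp [hp])
    by_cases hv : q.2 = value
    · rw [List.map_cons,
        show newNumberToSpeakLoop value list (q.1 :: R.map (fun p => p.1)) (-1) (-1)
            = newNumberToSpeakLoop value list (R.map (fun p => p.1)) q.1 (-1) from by
          simp [newNumberToSpeakLoop, hq, hv],
        List.filter_cons, if_pos (by simpa using hv), List.map_cons]
      rw [loop_found value list R q.1 hq0 (fun p hp => (hrest p hp).2)]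
      cases h : (R.filter (fun p => p.2 == value)).map (fun p => p.1) <;> simp
    · rw [List.map_cons,
        show newNumberToSpeakLoop value list (q.1 :: R.map (fun p => p.1)) (-1) (-1)
            = newNumberToSpeakLoop value list (R.map (fun p => p.1)) (-1) (-1) from by
          simp [newNumberToSpeakLoop, hq, hv],
        List.filter_cons, if_neg (by simpa using hv)]
      exact ih hrest

-- ===== VERDICT (by name: the statement is the Claim_ definition above) =====
theorem newNumberToSpeak_spec : Claim_equal_newNumberToSpeak := by
  intro value list _
  unfold Spec_newNumberToSpeak newNumberToSpeak newNumberToSpeak_alt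
  have hrange : PySem.List.pyRange ((list.length : Int) - 1) (-1) (-1)
      = ((PySem.List.enumerate list 0).reverse).map (fun p => p.1) := by
    rw [List.map_reverse]
    have hfst := PySem.List.map_fst_enumerate list 0
    rw [show (fun p : Int × Int => p.1) = Prod.fst from rfl, hfst]
    rw [PySem.List.pyRange_neg_one_eq_reverse]
    norm_num
  rw [hrange, loop_start value list (PySem.List.enumerate list 0).reverse
      (fun p hp => by
        have := mem_enumerate_spec list 0 p (by simpa using hp)
        simpa using this)]
  rw [List.filter_reverse, List.map_reverse]
  simp only []
  generalize ((PySem.List.enumerate list 0).filter (fun p => p.2 == value)).map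
      (fun p => p.1) = idxs
  cases h : idxs.reverse with
  | nil =>
    have : idxs = [] := by simpa using congrArg List.reverse h
    simp [this]
  | cons a t =>
    cases t with
    | nil =>
      have : idxs = [a] := by simpa using congrArg List.reverse h
      simp [this]
    | cons b t =>
      have hlen : idxs.length = t.length + 2 := by
        have := congrArg List.length h; simpa using this
      have hidxs' : idxs = (t.reverse ++ [b]) ++ [a] := by
        have := congrArg List.reverse h
        simpa using this
      rw [if_pos (by omega)]
      rw [PySem.List.pyGetD_neg_ofNat idxs 2 0 (by omega) (by omega)]
      have h1 : PySem.List.pyGetD idxs (-1) 0 = a := by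
        rw [hidxs']; exact PySem.List.pyGetD_neg_one_append_singleton _ _ _
      have h2 : idxs[idxs.length - 2] = b := by
        rw [List.getElem_eq_iff, hidxs']
        simp
      rw [h1, h2]
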